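-- pv_equiv track=rewrite | github.com/surahotoke/four-colors-Voronoi | voronoi4colors.py | get_touching_polygons
-- ===== SOURCE A (Python) =====
-- def get_touching_polygons(polygons):
--     touching_polygons = []
--     for index0, vertices0 in enumerate(polygons):
--         touching_polygon = []
--         for index1, vertices1 in enumerate(polygons):
--             if index0 != index1 and set(vertices0) & set(vertices1):
--                 touching_polygon.append(index1)
--         touching_polygons.append(touching_polygon)
--     return touching_polygons
-- ===== SOURCE B (Python) =====
-- def get_touching_polygons(polygons):
--     # Inverted index: vertex -> list of polygon indices containing it (increasing).
--     index = {}
--     for i, verts in enumerate(polygons):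
--         for v in set(verts):
--             index.setdefault(v, []).append(i)
--     result = []
--     for i, verts in enumerate(polygons):
--         neighbors = set()
--         for v in set(verts):
--             neighbors.update(index[v])
--         neighbors.discard(i)
--         result.append(sorted(neighbors))
--     return result
-- ===== Notes on version B (the rewrite author's own statement) =====
-- stated objective: faster
-- what changed: Replaces the all-pairs set-intersection scan with an inverted index vertex->polygon-indices built in one pass, gathering each polygon's neighbours from the index and sorting them.
import Mathlib
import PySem

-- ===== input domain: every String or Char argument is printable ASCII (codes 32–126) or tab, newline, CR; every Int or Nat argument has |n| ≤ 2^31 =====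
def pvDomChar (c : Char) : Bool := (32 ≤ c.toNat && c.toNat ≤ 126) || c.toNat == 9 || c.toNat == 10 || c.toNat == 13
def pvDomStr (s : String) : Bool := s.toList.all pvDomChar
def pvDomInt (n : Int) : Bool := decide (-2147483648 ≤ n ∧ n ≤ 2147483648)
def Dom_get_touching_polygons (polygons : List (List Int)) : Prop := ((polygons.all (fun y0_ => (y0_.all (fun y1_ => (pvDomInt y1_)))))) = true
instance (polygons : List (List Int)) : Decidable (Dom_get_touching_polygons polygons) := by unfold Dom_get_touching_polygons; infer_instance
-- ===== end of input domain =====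

-- B replaces A's all-pairs intersection scan by an inverted index vertex → polygon indices
-- and gathers each polygon's neighbours from that index (sorted at the end).

-- ===== PORT A =====
def get_touching_polygons (polygons : List (List Int)) : List (List Int) :=
  (PySem.List.enumerate polygons).foldl
    (fun touching_polygons p0 =>
      touching_polygons ++
        [(PySem.List.enumerate polygons).foldl
          (fun touching_polygon p1 =>
            if p0.1 ≠ p1.1 ∧
                PySem.Set.inter (PySem.Set.ofList p0.2) (PySem.Set.ofList p1.2) ≠ [] then
              touching_polygon ++ [p1.1]
            else touching_polygon) []]) []

-- ===== PORT B =====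
-- the inverted index: vertex -> list of indices of the polygons containing it
def pvIndex (polygons : List (List Int)) : PySem.Dict Int (List Int) :=
  (PySem.List.enumerate polygons).foldl
    (fun d p => (PySem.Set.ofList p.2).foldl (fun d v => d.modify v [] (· ++ [p.1])) d)
    PySem.Dict.empty

-- `index[v]` in Source B cannot raise (v was just indexed); ported as getD with default []
def get_touching_polygons_alt (polygons : List (List Int)) : List (List Int) :=
  let index := pvIndex polygons
  (PySem.List.enumerate polygons).foldl
    (fun result p =>
      result ++
        [PySem.List.sorted
          (PySem.Set.discard
            ((PySem.Set.ofList p.2).foldl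
              (fun s v => PySem.Set.update s (index.getD v [])) PySem.Set.empty)
            p.1)
          (fun x => x)]) []

-- ===== PRECONDITION & SPEC =====
def Spec_get_touching_polygons (polygons : List (List Int)) (out : List (List Int)) : Prop := out = get_touching_polygons_alt polygons
instance (polygons : List (List Int)) (out : List (List Int)) : Decidable (Spec_get_touching_polygons polygons out) := by unfold Spec_get_touching_polygons; infer_instance

-- ===== CLAIM (what is proved, stated in full; the proofs are below) =====
def Claim_equal_get_touching_polygons : Prop := ∀ (polygons : List (List Int)), Dom_get_touching_polygons polygons → Spec_get_touching_polygons polygons (get_touching_polygons polygons)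

-- ===== LEMMAS AND PROOFS =====

-- an append-if foldl with a Prop test is the filtered map
lemma foldl_append_if_prop {α β : Type} (P : α → Prop) [DecidablePred P] (f : α → β)
    (l : List α) (acc : List β) :
    l.foldl (fun acc x => if P x then acc ++ [f x] else acc) acc
      = acc ++ (l.filter (fun x => decide (P x))).map f := by
  have h := PySem.List.foldl_append_if (fun x => decide (P x)) f l acc
  simpa using h

-- nonempty set intersection = some shared element
lemma inter_ne_nil_iff (v0 v1 : List Int) :
    PySem.Set.inter (PySem.Set.ofList v0) (PySem.Set.ofList v1) ≠ [] ↔ ∃ x ∈ v0, x ∈ v1 := by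
  constructor
  · intro h
    rcases List.exists_mem_of_ne_nil _ h with ⟨y, hy⟩
    rw [PySem.Set.mem_inter, PySem.Set.mem_ofList, PySem.Set.mem_ofList] at hy
    exact ⟨y, hy.1, hy.2⟩
  · rintro ⟨x, hx0, hx1⟩ h
    have hx : x ∈ PySem.Set.inter (PySem.Set.ofList v0) (PySem.Set.ofList v1) :=
      (PySem.Set.mem_inter _ _ _).mpr ⟨(PySem.Set.mem_ofList _ _).mpr hx0, (PySem.Set.mem_ofList _ _).mpr hx1⟩
    rw [h] at hx
    exact (List.not_mem_nil) hx

-- filtering a Nodup list for equality with c gives [c] or []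
lemma filter_beq_of_nodup (l : List Int) (h : l.Nodup) (c : Int) :
    l.filter (fun x => x == c) = if c ∈ l then [c] else [] := by
  have h1 : l.filter (fun x => x == c) = l.filter (fun x => decide (x = c)) := by
    apply List.filter_congr; intro x _; rfl
  rw [h1, List.filter_eq]
  by_cases hc : c ∈ l
  · rw [List.count_eq_one_of_mem h hc]; simp [hc]
  · simp [List.count_eq_zero_of_not_mem hc, hc]

-- what the inverted-index build puts under key c
lemma getD_index_build (L : List (Int × List Int)) (d : PySem.Dict Int (List Int)) (c : Int) :
    (L.foldl (fun d p => (PySem.Set.ofList p.2).foldl (fun d v => d.modify v [] (· ++ [p.1])) d) d).getD c []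
      = d.getD c [] ++ (L.filter (fun p => decide (c ∈ p.2))).map (·.1) := by
  induction L generalizing d with
  | nil => simp
  | cons p L ih =>
    simp only [List.foldl_cons, List.filter_cons, ih]
    have h1 : (PySem.Set.ofList p.2).foldl (fun d v => d.modify v [] (· ++ [p.1])) d
        = ((PySem.Set.ofList p.2).map (fun v => (v, p.1))).foldl
            (fun d q => d.modify q.1 [] (· ++ [q.2])) d := by
      rw [List.foldl_map]
    rw [h1, PySem.Dict.getD_foldl_modify_append, List.filter_map]
    have h2 : ((fun q : Int × Int => q.1 == c) ∘ fun v : Int => (v, p.1))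
        = (fun v : Int => v == c) := rfl
    rw [h2, filter_beq_of_nodup _ (PySem.Set.nodup_ofList _) c]
    by_cases hc : c ∈ p.2
    · simp [PySem.Set.mem_ofList, hc]
    · simp [PySem.Set.mem_ofList, hc]

-- membership in the gathered-neighbours fold
lemma mem_fold_update (g : Int → List Int) (vs : List Int) (s0 : List Int) (j : Int) :
    j ∈ vs.foldl (fun s v => PySem.Set.update s (g v)) s0 ↔ j ∈ s0 ∨ ∃ v ∈ vs, j ∈ g v := by
  induction vs generalizing s0 with
  | nil => simp
  | cons v vs ih => simp [ih, PySem.Set.mem_update]; tauto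

lemma nodup_fold_update (g : Int → List Int) (vs : List Int) (s0 : List Int) (h : s0.Nodup) :
    (vs.foldl (fun s v => PySem.Set.update s (g v)) s0).Nodup := by
  induction vs generalizing s0 with
  | nil => exact h
  | cons v vs ih => exact ih _ (PySem.Set.nodup_update _ _ h)

-- what the index holds under key v
lemma mem_index (polygons : List (List Int)) (v j : Int) :
    j ∈ (pvIndex polygons).getD v []
      ↔ ∃ p1 ∈ PySem.List.enumerate polygons, v ∈ p1.2 ∧ p1.1 = j := by
  unfold pvIndex
  rw [getD_index_build]
  simp [List.mem_filter, And.comm]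

-- the i-th row of both programs, as one equation
lemma row_eq (polygons : List (List Int)) (p0 : Int × List Int) :
    PySem.List.sorted
      (PySem.Set.discard
        ((PySem.Set.ofList p0.2).foldl
          (fun s v => PySem.Set.update s ((pvIndex polygons).getD v [])) PySem.Set.empty)
        p0.1)
      (fun x => x)
    = ((PySem.List.enumerate polygons).filter
        (fun p1 => decide (p0.1 ≠ p1.1 ∧
          PySem.Set.inter (PySem.Set.ofList p0.2) (PySem.Set.ofList p1.2) ≠ []))).map (·.1) := by
  have hpair : (((PySem.List.enumerate polygons).filter
      (fun p1 => decide (p0.1 ≠ p1.1 ∧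
        PySem.Set.inter (PySem.Set.ofList p0.2) (PySem.Set.ofList p1.2) ≠ []))).map
        (fun p1 : Int × List Int => p1.1)).Pairwise (· < ·) := by
    rw [List.pairwise_map]
    exact (PySem.List.pairwise_lt_enumerate polygons 0).filter _
  apply PySem.List.sorted_eq_of_perm_of_pairwise_lt
  · refine (List.perm_ext_iff_of_nodup (hpair.imp ne_of_lt)
      (PySem.Set.nodup_discard _ _ (nodup_fold_update _ _ _ List.nodup_nil))).mpr ?_
    intro j
    simp only [List.mem_map, List.mem_filter, PySem.Set.mem_discard, mem_fold_update,
      PySem.Set.mem_ofList, decide_eq_true_eq, inter_ne_nil_iff, mem_index,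
      List.not_mem_nil, false_or]
    constructor
    · rintro ⟨p1, ⟨hp1, hne, x, hx0, hx1⟩, rfl⟩
      exact ⟨⟨x, hx0, p1, hp1, hx1, rfl⟩, fun h => hne h.symm⟩
    · rintro ⟨⟨v, hv0, p1, hp1, hv1, rfl⟩, hne⟩
      exact ⟨p1, ⟨hp1, fun h => hne h.symm, v, hv0, hv1⟩, rfl⟩
  · exact hpair

-- ===== VERDICT (by name: the statement is the Claim_ definition above) =====
theorem get_touching_polygons_spec : Claim_equal_get_touching_polygons := by
  intro polygons _
  unfold Spec_get_touching_polygons get_touching_polygons get_touching_polygons_alt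
  simp only [PySem.List.foldl_append_singleton_eq_map, List.nil_append]
  apply List.map_congr_left
  intro p0 _
  rw [foldl_append_if_prop
        (fun p1 : Int × List Int => p0.1 ≠ p1.1 ∧ PySem.Set.inter (PySem.Set.ofList p0.2) (PySem.Set.ofList p1.2) ≠ [])
        (fun p1 : Int × List Int => p1.1)]
  rw [row_eq]
  simp
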